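-- pv_equiv track=rewrite | github.com/labuwx/progpuzzles | advent_of_code/2020/16/16.py | find_bijection
-- ===== SOURCE A (Python) =====
-- import copy
--
-- def find_bijection(map):
--     map = copy.deepcopy(map)
--     fixed, change = set(), True
--     while change:
--         change = False
--         for k, v in map.items():
--             if len(v) != 1 or k in fixed:
--                 continue
--             fixed.add(k)
--             v = next(iter(v))
--             for k2, v2 in map.items():
--                 if k2 != k and v in v2:
--                     change = True
--                     v2.remove(v)
--     map = {k: next(iter(v)) for k, v in map.items()}
--     return map
-- ===== SOURCE B (Python) =====
-- import copy
--
-- def find_bijection(map):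
--     # Worklist propagation: newly-singleton keys are queued and processed once,
--     # instead of rescanning the whole dict until a full pass makes no change.
--     map = copy.deepcopy(map)
--     queue = [k for k, v in map.items() if len(v) == 1]
--     fixed = set()
--     while queue:
--         k = queue.pop()
--         if k in fixed or len(map[k]) != 1:
--             continue
--         fixed.add(k)
--         val = next(iter(map[k]))
--         for k2, v2 in map.items():
--             if k2 != k and val in v2:
--                 v2.remove(val)
--                 if len(v2) == 1:
--                     queue.append(k2)
--     return {k: next(iter(v)) for k, v in map.items()}
-- ===== Notes on version B (the rewrite author's own statement) =====
-- stated objective: alternative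
-- what changed: Replaces A's repeated full rescans of the dict (while-changed passes) by a worklist: keys whose candidate set becomes a singleton are queued once and each fixed key's value is swept from the other sets exactly once.
import Mathlib
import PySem

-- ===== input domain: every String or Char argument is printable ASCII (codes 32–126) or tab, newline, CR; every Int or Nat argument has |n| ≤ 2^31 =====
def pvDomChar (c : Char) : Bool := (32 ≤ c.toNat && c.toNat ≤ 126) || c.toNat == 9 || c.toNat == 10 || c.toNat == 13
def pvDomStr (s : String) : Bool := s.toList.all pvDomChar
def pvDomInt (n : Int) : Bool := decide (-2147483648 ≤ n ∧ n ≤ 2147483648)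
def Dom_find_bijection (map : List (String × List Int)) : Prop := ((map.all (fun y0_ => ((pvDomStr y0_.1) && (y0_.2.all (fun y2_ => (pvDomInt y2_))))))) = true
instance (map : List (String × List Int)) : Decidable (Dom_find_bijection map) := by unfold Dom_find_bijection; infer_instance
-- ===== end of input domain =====

-- B replaces A's repeated full rescans of the dict by a worklist of newly-singleton
-- keys, each processed once (objective: alternative algorithm, same exact values).
-- Input sets (dict[str, set[int]]) arrive as their element lists in sorted-by-repr
-- insertion order; `next(iter(s))` picks by CPython set-table iteration order, so both
-- ports normalise each list with a hand port of CPython's set insertion (setobject.c),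
-- exact on the |n| ≤ 2^31 domain (no deletions happen before the orders are taken:
-- A deepcopies the dict and B deepcopies too, hence the double application below).

-- ===== CPython set-order model (shared input decoding, used by both ports) =====
def pvHash (n : Int) : Nat :=
  if n = -1 then 18446744073709551614
  else ((n % (18446744073709551616 : Int)).toNat)

def pvFindSlot (tab : List (Option Int)) (mask : Nat) :
    Nat → Nat → Nat → Option Nat
  | 0, _, _ => none
  | fuel+1, i, perturb =>
    let probes := if i + 9 ≤ mask then 9 else 0
    match ((List.range (probes+1)).map (i + ·)).find?
        (fun j => tab.getD j (some 0) == none) with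
    | some j => some j
    | none => pvFindSlot tab mask fuel ((i*5+1+(perturb >>> 5)) &&& mask) (perturb >>> 5)

def pvFallback : List (Option Int) → Int → List (Option Int)
  | [], x => [some x]
  | none :: t, x => some x :: t
  | some y :: t, x => some y :: pvFallback t x

def pvPlace (tab : List (Option Int)) (x : Int) : List (Option Int) :=
  let h := pvHash x
  match pvFindSlot tab (tab.length - 1) (2*tab.length + 64) (h &&& (tab.length - 1)) h with
  | some j => tab.set j (some x)
  | none => pvFallback tab x  -- unreachable fallback keeping the function total

def pvElems (tab : List (Option Int)) : List Int := tab.filterMap id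

def pvGrow : Nat → Nat → Nat → Nat
  | 0, sz, _ => sz
  | f+1, sz, mu => if sz < mu then pvGrow f (sz*2) mu else sz

def pvResize (tab : List (Option Int)) : List (Option Int) :=
  let keys := pvElems tab
  let minused := if keys.length > 50000 then keys.length*2 else keys.length*4
  keys.foldl pvPlace (List.replicate (pvGrow 64 8 minused) none)

def pvAdd (tab : List (Option Int)) (x : Int) : List (Option Int) :=
  if x ∈ pvElems tab then tab
  else
    let t := pvPlace tab x
    if (pvElems t).length * 5 ≥ (t.length - 1) * 3 then pvResize t else t

def pvSetList (xs : List Int) : List Int :=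
  pvElems (xs.foldl pvAdd (List.replicate 8 none))

-- a set as the Python function iterates it: decoded from the sorted-by-repr element
-- list, per-call argument deepcopy, then the function's own copy.deepcopy
def pvSetNorm (xs : List Int) : List Int := pvSetList (pvSetList (pvSetList xs))

-- ===== PORT A =====
def aSweep (k : String) (v : Int) : List (String × List Int) → List (String × List Int) × Bool
  | [] => ([], false)
  | (k2, v2) :: rest =>
    let r := aSweep k v rest
    if k2 ≠ k ∧ v ∈ v2 then ((k2, v2.erase v) :: r.1, true) else ((k2, v2) :: r.1, r.2)

def aPass : Nat → Nat → List (String × List Int) → List String → Bool →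
    List (String × List Int) × List String × Bool
  | 0, _, m, fixed, change => (m, fixed, change)
  | n+1, i, m, fixed, change =>
    match m[i]? with
    | none => (m, fixed, change)
    | some (k, v) =>
      if v.length = 1 ∧ k ∉ fixed then
        let s := aSweep k v.headI m
        aPass n (i+1) s.1 (k :: fixed) (change || s.2)
      else aPass n (i+1) m fixed change

def aTotal (m : List (String × List Int)) : Nat := (m.map (fun kv => kv.2.length)).sum

def aLoop : Nat → List (String × List Int) → List String → List (String × List Int)
  | 0, m, _ => m  -- fuel never runs out: every changing pass shrinks aTotal
  | fuel+1, m, fixed =>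
    let p := aPass m.length 0 m fixed false
    if p.2.2 then aLoop fuel p.1 p.2.1 else p.1

def find_bijection (map : List (String × List Int)) : List (String × Int) :=
  let m := map.map (fun kv => (kv.1, pvSetNorm kv.2))
  let r := aLoop (aTotal m + 1) m []
  r.map (fun kv => (kv.1, kv.2.headI))  -- next(iter(v)); empty v raises: excluded by Pre_

-- ===== PORT B =====
def bLookup (m : List (String × List Int)) (k : String) : List Int :=
  ((m.find? (fun kv => kv.1 == k)).map (fun kv => kv.2)).getD []

def bSweep (k : String) (v : Int) : List (String × List Int) → List (String × List Int) × List String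
  | [] => ([], [])
  | (k2, v2) :: rest =>
    let r := bSweep k v rest
    if k2 ≠ k ∧ v ∈ v2 then
      ((k2, v2.erase v) :: r.1, if (v2.erase v).length = 1 then k2 :: r.2 else r.2)
    else ((k2, v2) :: r.1, r.2)

def bGo : Nat → List (String × List Int) → List String → List String → List (String × List Int)
  | 0, m, _, _ => m  -- fuel never runs out: each key is queued at most twice
  | fuel+1, m, q, fixed =>
    match q.getLast? with
    | none => m
    | some k =>
      if k ∈ fixed ∨ ¬ (bLookup m k).length = 1 then bGo fuel m q.dropLast fixed
      else
        bGo fuel (bSweep k (bLookup m k).headI m).1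
          (q.dropLast ++ (bSweep k (bLookup m k).headI m).2) (k :: fixed)

def find_bijection_alt (map : List (String × List Int)) : List (String × Int) :=
  let m := map.map (fun kv => (kv.1, pvSetNorm kv.2))
  let q0 := (m.filter (fun kv => kv.2.length = 1)).map (fun kv => kv.1)
  let r := bGo (m.length * m.length + m.length + 1) m q0 []
  r.map (fun kv => (kv.1, kv.2.headI))

-- ===== PRECONDITION & SPEC =====
def pvVals (phi : List (String × Int)) : List Int := phi.map (·.2)
def pvValsExcept (phi : List (String × Int)) (k : String) : List Int :=
  (phi.filter (fun p => p.1 ≠ k)).map (·.2)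

-- phi is "good": its (distinct) values are exactly forced — each phi-key's set holds
-- phi's value for it and otherwise only values of other phi-keys — and every non-phi
-- key keeps at least two candidates that are no phi-values at all.
def pvGoodFor (map : List (String × List Int)) (phi : List (String × Int)) : Bool :=
  decide ((phi.map (·.2)).Nodup) &&
  map.all (fun p => phi.all (fun q =>
    q.1 != p.1 ||
      (p.2.contains q.2 &&
       p.2.all (fun y => (pvValsExcept phi p.1).contains y || y == q.2)))) &&
  map.all (fun p =>
    !(phi.all (fun q => q.1 != p.1)) ||
      p.2.any (fun y => p.2.any (fun z =>
        y != z && !(pvVals phi).contains y && !(pvVals phi).contains z)))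

-- Pre_: the dict/set representation invariants (distinct keys, distinct elements per
-- set) plus "no candidate set is ever emptied by the elimination", stated closed-form:
-- some sub-assignment phi (a choice of one value per key of some sub-dict) is good in
-- the above sense.  This is exactly where Python A returns normally; everywhere else
-- A raises StopIteration from next(iter(<emptied set>)) in its final comprehension.
-- all ways of choosing one value (k, x) per entry of a sub-dict S
def pvChoiceSets (S : List (String × List Int)) : List (List (String × Int)) :=
  S.foldr (fun p acc => p.2.flatMap (fun x => acc.map ((p.1, x) :: ·))) [[]]

def Pre_find_bijection (map : List (String × List Int)) : Prop :=
  ((map.map (·.1)).Nodup ∧ ∀ p ∈ map, p.2.Nodup) ∧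
  ∃ S ∈ map.sublists, ∃ phi ∈ pvChoiceSets S, pvGoodFor map phi = true

instance (map : List (String × List Int)) : Decidable (Pre_find_bijection map) := by
  unfold Pre_find_bijection; infer_instance

def pvWitness_find_bijection : (List (String × List Int)) :=
  [("a", [1]), ("b", [1, 2]), ("c", [2, 3, 4])]

def Spec_find_bijection (map : List (String × List Int)) (out : List (String × Int)) : Prop :=
  out = find_bijection_alt map
instance (map : List (String × List Int)) (out : List (String × Int)) :
    Decidable (Spec_find_bijection map out) := by unfold Spec_find_bijection; infer_instance

-- ===== CLAIM (what is proved, stated in full; the proofs are below) =====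
def Claim_equal_find_bijection : Prop := ∀ (map : List (String × List Int)),
  Dom_find_bijection map → Pre_find_bijection map →
  Spec_find_bijection map (find_bijection map)


-- ===== LEMMAS AND PROOFS =====

-- ---- generic list facts ----
theorem pv_assoc_unique {α β : Type} [DecidableEq α] {l : List (α × β)}
    (h : (l.map (·.1)).Nodup) {k : α} {a b : β}
    (ha : (k, a) ∈ l) (hb : (k, b) ∈ l) : a = b := by
  induction l with
  | nil => cases ha
  | cons p t ih =>
    simp only [List.map_cons, List.nodup_cons] at h
    rcases List.mem_cons.1 ha with h1 | h1
    · rcases List.mem_cons.1 hb with h2 | h2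
      · cases h1.trans h2.symm; rfl
      · exfalso; rw [← h1] at h; exact h.1 (List.mem_map.2 ⟨_, h2, rfl⟩)
    · rcases List.mem_cons.1 hb with h2 | h2
      · exfalso; rw [← h2] at h; exact h.1 (List.mem_map.2 ⟨_, h1, rfl⟩)
      · exact ih h.2 h1 h2

theorem pv_len_one_eq {l : List Int} (h : l.length = 1) {y z : Int}
    (hy : y ∈ l) (hz : z ∈ l) : y = z := by
  rcases List.length_eq_one_iff.1 h with ⟨a, rfl⟩
  simp at hy hz; rw [hy, hz]

-- ---- CPython set model: the element list is a permutation of the distinct inputs ----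
theorem pvElems_replicate (n : Nat) : pvElems (List.replicate n none) = [] := by
  induction n with
  | zero => rfl
  | succ n ih => simpa [pvElems, List.replicate_succ] using ih

theorem pvFindSlot_none {tab : List (Option Int)} {mask fuel i perturb : Nat} {j : Nat}
    (h : pvFindSlot tab mask fuel i perturb = some j) : tab[j]? = some none := by
  induction fuel generalizing i perturb with
  | zero => simp [pvFindSlot] at h
  | succ fuel ih =>
    rw [pvFindSlot] at h
    rcases hf : ((List.range ((if i + 9 ≤ mask then 9 else 0)+1)).map (i + ·)).find?
        (fun j => tab.getD j (some 0) == none) with _ | j'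
    · rw [hf] at h; exact ih h
    · rw [hf] at h
      cases h
      have hp := List.find?_some hf
      have : tab.getD j (some 0) = none := by simpa using hp
      rcases hj : tab[j]? with _ | o
      · simp [List.getD, hj] at this
      · simp [List.getD, hj] at this; rw [this]

theorem pvElems_set_perm {tab : List (Option Int)} {j : Nat} {x : Int}
    (h : tab[j]? = some none) :
    (pvElems (tab.set j (some x))).Perm (x :: pvElems tab) := by
  induction tab generalizing j with
  | nil => simp at h
  | cons o t ih =>
    cases j with
    | zero =>
      simp at h
      subst h
      simp [pvElems]
    | succ j =>
      simp at h
      cases o with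
      | none => simpa [pvElems] using ih h
      | some y =>
        simp only [List.set_cons_succ, pvElems, List.filterMap_cons]
        exact ((ih h).cons y).trans (List.Perm.swap x y _)

theorem pvElems_fallback_perm (tab : List (Option Int)) (x : Int) :
    (pvElems (pvFallback tab x)).Perm (x :: pvElems tab) := by
  induction tab with
  | nil => simp [pvFallback, pvElems]
  | cons o t ih =>
    cases o with
    | none => simp [pvFallback, pvElems]
    | some y =>
      simp only [pvFallback, pvElems, List.filterMap_cons]
      exact (ih.cons y).trans (List.Perm.swap x y _)

theorem pvElems_place_perm (tab : List (Option Int)) (x : Int) :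
    (pvElems (pvPlace tab x)).Perm (x :: pvElems tab) := by
  rcases hf : pvFindSlot tab (tab.length - 1) (2*tab.length + 64) (pvHash x &&& (tab.length - 1)) (pvHash x) with _ | j
  · rw [pvPlace]; rw [hf]; exact pvElems_fallback_perm tab x
  · rw [pvPlace]; rw [hf]; exact pvElems_set_perm (pvFindSlot_none hf)

theorem pvElems_foldl_place_perm (l : List Int) (tab : List (Option Int)) :
    (pvElems (l.foldl pvPlace tab)).Perm (l ++ pvElems tab) := by
  induction l generalizing tab with
  | nil => simp
  | cons a l ih =>
    simp only [List.foldl_cons, List.cons_append]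
    exact ((ih (pvPlace tab a)).trans
      (List.Perm.append_left l (pvElems_place_perm tab a))).trans List.perm_middle

theorem pvElems_resize_perm (tab : List (Option Int)) :
    (pvElems (pvResize tab)).Perm (pvElems tab) := by
  rw [pvResize]
  simpa [pvElems_replicate] using
    pvElems_foldl_place_perm (pvElems tab)
      (List.replicate (pvGrow 64 8 (if (pvElems tab).length > 50000 then (pvElems tab).length*2 else (pvElems tab).length*4)) none)

theorem pv_add_perm (tab : List (Option Int)) (x : Int) :
    pvAdd tab x = tab ∧ x ∈ pvElems tab ∨
    (x ∉ pvElems tab ∧ (pvElems (pvAdd tab x)).Perm (x :: pvElems tab)) := by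
  by_cases hx : x ∈ pvElems tab
  · exact Or.inl ⟨by simp [pvAdd, hx], hx⟩
  · refine Or.inr ⟨hx, ?_⟩
    rw [pvAdd]
    simp only [hx, if_neg, ite_false]
    split
    · exact (pvElems_resize_perm _).trans (pvElems_place_perm tab x)
    · exact pvElems_place_perm tab x

theorem pvElems_add_mem {tab : List (Option Int)} {x y : Int} :
    y ∈ pvElems (pvAdd tab x) ↔ y = x ∨ y ∈ pvElems tab := by
  rcases pv_add_perm tab x with ⟨he, hx⟩ | ⟨_, hp⟩
  · rw [he]
    constructor
    · exact Or.inr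
    · rintro (rfl | h) <;> [exact hx; exact h]
  · rw [hp.mem_iff]; simp

theorem pvElems_add_nodup {tab : List (Option Int)} {x : Int}
    (h : (pvElems tab).Nodup) : (pvElems (pvAdd tab x)).Nodup := by
  rcases pv_add_perm tab x with ⟨he, _⟩ | ⟨hx, hp⟩
  · rw [he]; exact h
  · rw [hp.nodup_iff]; exact List.Nodup.cons (fun hc => hx hc) h

theorem pv_fold_add (xs : List Int) : ∀ t : List (Option Int),
    ((pvElems t).Nodup → (pvElems (xs.foldl pvAdd t)).Nodup) ∧
    (∀ y, y ∈ pvElems (xs.foldl pvAdd t) ↔ y ∈ xs ∨ y ∈ pvElems t) := by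
  induction xs with
  | nil => intro t; simp
  | cons x xs ih =>
    intro t
    constructor
    · intro h
      exact (ih (pvAdd t x)).1 (pvElems_add_nodup h)
    · intro y
      rw [List.foldl_cons, (ih (pvAdd t x)).2 y, pvElems_add_mem]
      simp [or_assoc]
      tauto

theorem pvSetList_mem {xs : List Int} {y : Int} : y ∈ pvSetList xs ↔ y ∈ xs := by
  rw [pvSetList, (pv_fold_add xs _).2 y, pvElems_replicate]
  simp

theorem pvSetList_nodup (xs : List Int) : (pvSetList xs).Nodup := by
  rw [pvSetList]
  exact (pv_fold_add xs _).1 (by rw [pvElems_replicate]; exact List.nodup_nil)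

theorem pvSetNorm_mem {xs : List Int} {y : Int} : y ∈ pvSetNorm xs ↔ y ∈ xs := by
  simp [pvSetNorm, pvSetList_mem]

theorem pvSetNorm_nodup (xs : List Int) : (pvSetNorm xs).Nodup := by
  simp [pvSetNorm, pvSetList_nodup]

-- ---- the elimination context: normalised map plus a good sub-assignment ----
structure PvCtx : Type where
  sg : List (String × List Int)
  phi : List (String × Int)
  hkeys : (sg.map (·.1)).Nodup
  hvals : ∀ p ∈ sg, p.2.Nodup
  hphiNk : (phi.map (·.1)).Nodup
  hphiNv : (phi.map (·.2)).Nodup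
  hmem : ∀ q ∈ phi, ∀ p ∈ sg, p.1 = q.1 → q.2 ∈ p.2
  hforced : ∀ p ∈ sg, ∀ q ∈ phi, q.1 = p.1 → ∀ y ∈ p.2, y ∉ pvValsExcept phi p.1 → y = q.2
  hfree : ∀ p ∈ sg, (∀ q ∈ phi, q.1 ≠ p.1) →
    ∃ y ∈ p.2, ∃ z ∈ p.2, y ≠ z ∧ y ∉ pvVals phi ∧ z ∉ pvVals phi

def pvValsIn (phi : List (String × Int)) (S : List String) (k : String) : List Int :=
  (phi.filter (fun p => decide (p.1 ∈ S) && p.1 != k)).map (·.2)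

def pvStrip (phi : List (String × Int)) (S : List String)
    (sg : List (String × List Int)) : List (String × List Int) :=
  sg.map (fun kv => (kv.1, kv.2.filter (fun y => decide (y ∉ pvValsIn phi S kv.1))))

inductive PvReach (c : PvCtx) : List String → Prop
  | nil : PvReach c []
  | cons {S : List String} {k : String} {x : Int} {v : List Int} :
      PvReach c S → k ∉ S → (k, x) ∈ c.phi → (k, v) ∈ c.sg →
      v.filter (fun y => decide (y ∉ pvValsIn c.phi S k)) = [x] →
      PvReach c (k :: S)

def PvClosed (c : PvCtx) (S : List String) : Prop :=
  ∀ p ∈ c.sg, (p.2.filter (fun y => decide (y ∉ pvValsIn c.phi S p.1))).length = 1 → p.1 ∈ S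

theorem pv_snd_unique {α β : Type} {l : List (α × β)}
    (h : (l.map (·.2)).Nodup) {a b : α} {x : β}
    (ha : (a, x) ∈ l) (hb : (b, x) ∈ l) : a = b := by
  induction l with
  | nil => cases ha
  | cons p t ih =>
    simp only [List.map_cons, List.nodup_cons] at h
    rcases List.mem_cons.1 ha with h1 | h1
    · rcases List.mem_cons.1 hb with h2 | h2
      · cases h1.trans h2.symm; rfl
      · exfalso; rw [← h1] at h; exact h.1 (List.mem_map.2 ⟨_, h2, rfl⟩)
    · rcases List.mem_cons.1 hb with h2 | h2
      · exfalso; rw [← h2] at h; exact h.1 (List.mem_map.2 ⟨_, h1, rfl⟩)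
      · exact ih h.2 h1 h2

theorem pvValsIn_mem {phi : List (String × Int)} {S : List String} {k : String} {y : Int} :
    y ∈ pvValsIn phi S k ↔ ∃ q ∈ phi, q.1 ∈ S ∧ q.1 ≠ k ∧ q.2 = y := by
  simp only [pvValsIn, List.mem_map, List.mem_filter, Bool.and_eq_true,
    decide_eq_true_eq, bne_iff_ne]
  tauto

theorem pvValsIn_sub_vals {phi : List (String × Int)} {S : List String} {k : String} {y : Int}
    (h : y ∈ pvValsIn phi S k) : y ∈ pvVals phi := by
  rcases pvValsIn_mem.1 h with ⟨q, hq, _, _, hy⟩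
  exact List.mem_map.2 ⟨q, hq, hy⟩

theorem pv_val_not_in (c : PvCtx) {S : List String} {k : String} {x : Int}
    (hk : (k, x) ∈ c.phi) : x ∉ pvValsIn c.phi S k := by
  intro h
  rcases pvValsIn_mem.1 h with ⟨q, hq, _, hne, hy⟩
  have hq' : (q.1, x) ∈ c.phi := by rw [← hy]; exact hq
  exact hne (pv_snd_unique c.hphiNv hq' hk)

theorem pv_singleton_char (c : PvCtx) {S : List String} {k : String} {v : List Int}
    (hv : (k, v) ∈ c.sg)
    (h1 : (v.filter (fun y => decide (y ∉ pvValsIn c.phi S k))).length = 1) :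
    ∃ x, (k, x) ∈ c.phi ∧ v.filter (fun y => decide (y ∉ pvValsIn c.phi S k)) = [x] := by
  by_cases hx : ∃ q ∈ c.phi, q.1 = k
  · obtain ⟨⟨k', x⟩, hq, hk'⟩ := hx
    cases hk'
    have hxv : x ∈ v := c.hmem _ hq _ hv rfl
    have hxf : x ∈ v.filter (fun y => decide (y ∉ pvValsIn c.phi S k')) :=
      List.mem_filter.2 ⟨hxv, by simpa using pv_val_not_in c hq⟩
    rcases List.length_eq_one_iff.1 h1 with ⟨a, ha⟩
    rw [ha] at hxf
    simp at hxf
    exact ⟨x, hq, by rw [ha, hxf]⟩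
  · push_neg at hx
    obtain ⟨y, hy, z, hz, hyz, hyv, hzv⟩ := c.hfree _ hv (fun q hq => hx q hq)
    have hyf : y ∈ v.filter (fun w => decide (w ∉ pvValsIn c.phi S k)) :=
      List.mem_filter.2 ⟨hy, by simp; exact fun hc => hyv (pvValsIn_sub_vals hc)⟩
    have hzf : z ∈ v.filter (fun w => decide (w ∉ pvValsIn c.phi S k)) :=
      List.mem_filter.2 ⟨hz, by simp; exact fun hc => hzv (pvValsIn_sub_vals hc)⟩
    exact absurd (pv_len_one_eq h1 hyf hzf) hyz

theorem pv_filter_mono (c : PvCtx) {S T : List String} (hST : ∀ a ∈ S, a ∈ T)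
    {k : String} {x : Int} {v : List Int} (hk : (k, x) ∈ c.phi)
    (h : v.filter (fun y => decide (y ∉ pvValsIn c.phi S k)) = [x]) :
    v.filter (fun y => decide (y ∉ pvValsIn c.phi T k)) = [x] := by
  have hsub : ∀ y : Int, y ∈ pvValsIn c.phi S k → y ∈ pvValsIn c.phi T k := by
    intro y hy
    rcases pvValsIn_mem.1 hy with ⟨q, hq, hS, hne, hv'⟩
    exact pvValsIn_mem.2 ⟨q, hq, hST _ hS, hne, hv'⟩
  have hff : v.filter (fun y => decide (y ∉ pvValsIn c.phi T k)) =
      (v.filter (fun y => decide (y ∉ pvValsIn c.phi S k))).filter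
        (fun y => decide (y ∉ pvValsIn c.phi T k)) := by
    rw [List.filter_filter]
    refine (List.filter_congr ?_).symm
    intro y _
    by_cases hT : y ∈ pvValsIn c.phi T k
    · simp [hT]
    · simp only [hT, not_false_iff, decide_true, Bool.true_and, decide_eq_true_eq]
      exact fun hc => hT (hsub y hc)
  rw [hff, h]
  simp [pv_val_not_in c hk]

theorem pv_reach_sub (c : PvCtx) {S T : List String}
    (hS : PvReach c S) (hT : PvClosed c T) : ∀ a ∈ S, a ∈ T := by
  induction hS with
  | nil => simp
  | cons hr hkS hkphi hkv hfilt ih =>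
    intro a ha
    rcases List.mem_cons.1 ha with rfl | ha'
    · exact hT _ hkv (by rw [pv_filter_mono c ih hkphi hfilt]; rfl)
    · exact ih a ha' 

theorem pv_strip_eq_of_closed (c : PvCtx) {S T : List String}
    (hS : PvReach c S) (hT : PvReach c T) (hSc : PvClosed c S) (hTc : PvClosed c T) :
    pvStrip c.phi S c.sg = pvStrip c.phi T c.sg := by
  have hST := pv_reach_sub c hS hTc
  have hTS := pv_reach_sub c hT hSc
  unfold pvStrip
  refine List.map_congr_left ?_
  intro kv _
  refine congrArg _ ?_
  refine List.filter_congr ?_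
  intro y _
  rw [decide_eq_decide]
  constructor <;> intro hy hc <;> apply hy <;>
    rcases pvValsIn_mem.1 hc with ⟨q, hq, hmem, hne, hv'⟩
  · exact pvValsIn_mem.2 ⟨q, hq, hTS _ hmem, hne, hv'⟩
  · exact pvValsIn_mem.2 ⟨q, hq, hST _ hmem, hne, hv'⟩

-- ---- sweep scan shapes ----
def pvSweepMap (k : String) (x : Int) (m : List (String × List Int)) :
    List (String × List Int) :=
  m.map (fun p => if p.1 ≠ k ∧ x ∈ p.2 then (p.1, p.2.erase x) else p)

theorem aSweep_fst (k : String) (x : Int) (m : List (String × List Int)) :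
    (aSweep k x m).1 = pvSweepMap k x m := by
  induction m with
  | nil => rfl
  | cons p rest ih =>
    obtain ⟨k2, v2⟩ := p
    simp only [aSweep, pvSweepMap, List.map_cons]
    by_cases hc : k2 ≠ k ∧ x ∈ v2 <;>
      simp [hc, ih, pvSweepMap]

theorem aSweep_snd (k : String) (x : Int) (m : List (String × List Int)) :
    (aSweep k x m).2 = true ↔ ∃ p ∈ m, p.1 ≠ k ∧ x ∈ p.2 := by
  induction m with
  | nil => simp [aSweep]
  | cons p rest ih =>
    obtain ⟨k2, v2⟩ := p
    by_cases hc : k2 ≠ k ∧ x ∈ v2 <;> simp [aSweep, hc, ih]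

theorem bSweep_fst (k : String) (x : Int) (m : List (String × List Int)) :
    (bSweep k x m).1 = pvSweepMap k x m := by
  induction m with
  | nil => rfl
  | cons p rest ih =>
    obtain ⟨k2, v2⟩ := p
    simp only [bSweep, pvSweepMap, List.map_cons]
    by_cases hc : k2 ≠ k ∧ x ∈ v2 <;>
      simp [hc, ih, pvSweepMap]

theorem bSweep_snd (k : String) (x : Int) (m : List (String × List Int)) {k2 : String} :
    k2 ∈ (bSweep k x m).2 ↔
      ∃ v2, (k2, v2) ∈ m ∧ k2 ≠ k ∧ x ∈ v2 ∧ (v2.erase x).length = 1 := by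
  induction m with
  | nil => simp [bSweep]
  | cons p rest ih =>
    obtain ⟨k3, v3⟩ := p
    simp only [bSweep]
    by_cases hc : k3 ≠ k ∧ x ∈ v3
    · rw [if_pos hc]
      by_cases hl : (v3.erase x).length = 1
      · rw [if_pos hl]
        show k2 ∈ k3 :: (bSweep k x rest).2 ↔ _
        simp only [List.mem_cons, ih]
        constructor
        · rintro (rfl | ⟨v2, hv2, h⟩)
          · exact ⟨v3, Or.inl rfl, hc.1, hc.2, hl⟩
          · exact ⟨v2, Or.inr hv2, h⟩
        · rintro ⟨v2, (he | hv2), h⟩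
          · cases he; exact Or.inl rfl
          · exact Or.inr ⟨v2, hv2, h⟩
      · rw [if_neg hl]
        show k2 ∈ (bSweep k x rest).2 ↔ _
        simp only [ih, List.mem_cons]
        constructor
        · rintro ⟨v2, hv2, h⟩; exact ⟨v2, Or.inr hv2, h⟩
        · rintro ⟨v2, (he | hv2), h⟩
          · cases he; exact absurd h.2.2 hl
          · exact ⟨v2, hv2, h⟩
    · rw [if_neg hc]
      show k2 ∈ (bSweep k x rest).2 ↔ _
      simp only [ih, List.mem_cons]
      constructor
      · rintro ⟨v2, hv2, h⟩; exact ⟨v2, Or.inr hv2, h⟩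
      · rintro ⟨v2, (he | hv2), h⟩
        · cases he; exact absurd ⟨h.1, h.2.1⟩ hc
        · exact ⟨v2, hv2, h⟩

theorem pv_valsIn_cons_self (phi : List (String × Int)) (S : List String) (k : String) :
    pvValsIn phi (k :: S) k = pvValsIn phi S k := by
  unfold pvValsIn
  refine congrArg _ ?_
  refine List.filter_congr ?_
  intro p _
  by_cases hp : p.1 = k
  · simp [hp]
  · simp [hp, List.mem_cons]

theorem pv_bne_decide (x : Int) :
    (fun y => y != x) = (fun y : Int => decide (y ≠ x)) := by
  funext y; by_cases h : y = x <;> simp [h]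

theorem pv_strip_cons_entry (c : PvCtx) {S : List String} {k : String} {x : Int}
    (hk : (k, x) ∈ c.phi) {k2 : String} {v : List Int}
    (hkv : (k2, v) ∈ c.sg) (hne : k2 ≠ k) :
    v.filter (fun y => decide (y ∉ pvValsIn c.phi (k :: S) k2)) =
      (v.filter (fun y => decide (y ∉ pvValsIn c.phi S k2))).filter
        (fun y => decide (y ≠ x)) := by
  rw [List.filter_filter]
  refine List.filter_congr ?_
  intro y _
  have hiff : y ∉ pvValsIn c.phi (k :: S) k2 ↔
      (y ∉ pvValsIn c.phi S k2 ∧ y ≠ x) := by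
    constructor
    · intro hy
      constructor
      · intro hc
        rcases pvValsIn_mem.1 hc with ⟨q, hq, hmem, hqne, hv'⟩
        exact hy (pvValsIn_mem.2 ⟨q, hq, List.mem_cons_of_mem _ hmem, hqne, hv'⟩)
      · intro he
        exact hy (pvValsIn_mem.2 ⟨(k, x), hk, List.mem_cons_self, Ne.symm hne, he.symm⟩)
    · rintro ⟨hyS, hyx⟩ hc
      rcases pvValsIn_mem.1 hc with ⟨q, hq, hmem, hqne, hv'⟩
      rcases List.mem_cons.1 hmem with h1 | h1
      · have hq' : (k, q.2) ∈ c.phi := by rw [← h1]; exact hq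
        exact hyx (hv' ▸ (pv_assoc_unique c.hphiNk hq' hk ▸ rfl) : y = x)
      · exact hyS (pvValsIn_mem.2 ⟨q, hq, h1, hqne, hv'⟩)
  calc decide (y ∉ pvValsIn c.phi (k :: S) k2)
      = decide (y ∉ pvValsIn c.phi S k2 ∧ y ≠ x) := by rw [decide_eq_decide]; exact hiff
    _ = _ := by rw [Bool.decide_and, Bool.and_comm]

theorem pv_sweep_step (c : PvCtx) {S : List String} {k : String} {x : Int}
    (hk : (k, x) ∈ c.phi) :
    pvSweepMap k x (pvStrip c.phi S c.sg) = pvStrip c.phi (k :: S) c.sg := by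
  unfold pvSweepMap pvStrip
  rw [List.map_map]
  refine List.map_congr_left ?_
  rintro ⟨k2, v⟩ hkv
  simp only [Function.comp]
  by_cases h2 : k2 = k
  · subst h2
    rw [if_neg (by simp)]
    rw [pv_valsIn_cons_self]
  · have hE := pv_strip_cons_entry c (S := S) hk hkv h2
    by_cases hx : x ∈ v.filter (fun y => decide (y ∉ pvValsIn c.phi S k2))
    · have hcond : (k2 ≠ k ∧ x ∈ v.filter (fun y => decide (y ∉ pvValsIn c.phi S k2))) := ⟨h2, hx⟩
      rw [if_pos hcond]
      have hnd : (v.filter (fun y => decide (y ∉ pvValsIn c.phi S k2))).Nodup :=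
        (c.hvals _ hkv).filter _
      refine congrArg _ ?_
      rw [hnd.erase_eq_filter, pv_bne_decide, ← hE]
    · have hcond : ¬(k2 ≠ k ∧ x ∈ v.filter (fun y => decide (y ∉ pvValsIn c.phi S k2))) :=
        fun hc => hx hc.2
      rw [if_neg hcond]
      refine congrArg _ ?_
      rw [hE]
      refine (List.filter_eq_self.2 ?_).symm
      intro y hy
      simp only [decide_eq_true_eq]
      exact fun he => hx (he ▸ hy)

theorem pv_sweep_noop (c : PvCtx) {S : List String} {k : String} {x : Int}
    (hk : (k, x) ∈ c.phi)
    (h : ∀ p ∈ pvStrip c.phi S c.sg, ¬(p.1 ≠ k ∧ x ∈ p.2)) :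
    pvStrip c.phi (k :: S) c.sg = pvStrip c.phi S c.sg := by
  unfold pvStrip
  refine List.map_congr_left ?_
  rintro ⟨k2, v⟩ hkv
  by_cases h2 : k2 = k
  · subst h2
    rw [pv_valsIn_cons_self]
  · have hx : x ∉ v.filter (fun y => decide (y ∉ pvValsIn c.phi S k2)) := by
      intro hx
      exact h _ (List.mem_map.2 ⟨(k2, v), hkv, rfl⟩) ⟨h2, hx⟩
    have hE := pv_strip_cons_entry c (S := S) hk hkv h2
    refine congrArg _ ?_
    rw [hE]
    refine List.filter_eq_self.2 ?_
    intro y hy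
    simp only [decide_eq_true_eq]
    exact fun he => hx (he ▸ hy)

-- ---- sizes ----
theorem pv_aTotal_cons (q : String × List Int) (l : List (String × List Int)) :
    aTotal (q :: l) = q.2.length + aTotal l := by
  simp [aTotal]

theorem pv_aTotal_sweep_le (k : String) (x : Int) (m : List (String × List Int)) :
    aTotal (pvSweepMap k x m) ≤ aTotal m := by
  induction m with
  | nil => simp [pvSweepMap, aTotal]
  | cons q m ih =>
    simp only [pvSweepMap, List.map_cons] at *
    rw [pv_aTotal_cons, pv_aTotal_cons]
    have : (if q.1 ≠ k ∧ x ∈ q.2 then (q.1, q.2.erase x) else q).2.length ≤ q.2.length := by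
      split
      · exact List.length_erase_le
      · exact le_refl _
    omega

theorem pv_aTotal_sweep_lt {k : String} {x : Int} {m : List (String × List Int)}
    (h : ∃ p ∈ m, p.1 ≠ k ∧ x ∈ p.2) : aTotal (pvSweepMap k x m) < aTotal m := by
  induction m with
  | nil => simp at h
  | cons q m ih =>
    simp only [pvSweepMap, List.map_cons]
    rw [pv_aTotal_cons, pv_aTotal_cons]
    rcases h with ⟨p, hp, hc⟩
    rcases List.mem_cons.1 hp with rfl | hp'
    · rw [if_pos hc]
      have h1 : (p.2.erase x).length = p.2.length - 1 := List.length_erase_of_mem hc.2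
      have h2 : 0 < p.2.length := List.length_pos_of_mem hc.2
      have h3 := pv_aTotal_sweep_le k x m
      simp only [pvSweepMap] at h3
      show (p.1, p.2.erase x).2.length + _ < _
      simp only []
      omega
    · have h1 : (if q.1 ≠ k ∧ x ∈ q.2 then (q.1, q.2.erase x) else q).2.length ≤ q.2.length := by
        split
        · exact List.length_erase_le
        · exact le_refl _
      have h2 := ih ⟨p, hp', hc⟩
      simp only [pvSweepMap] at h2
      omega

theorem pv_strip_length (phi : List (String × Int)) (S : List String)
    (sg : List (String × List Int)) : (pvStrip phi S sg).length = sg.length := by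
  simp [pvStrip]

theorem pv_strip_getElem (phi : List (String × Int)) (S : List String)
    (sg : List (String × List Int)) (i : Nat) :
    (pvStrip phi S sg)[i]? = (sg[i]?).map
      (fun kv => (kv.1, kv.2.filter (fun y => decide (y ∉ pvValsIn phi S kv.1)))) := by
  simp [pvStrip]

theorem pv_strip_keys (phi : List (String × Int)) (S : List String)
    (sg : List (String × List Int)) :
    (pvStrip phi S sg).map (·.1) = sg.map (·.1) := by
  simp [pvStrip]

theorem pv_mem_of_getElem? {α : Type} {l : List α} {i : Nat} {a : α}
    (h : l[i]? = some a) : a ∈ l := by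
  rcases List.getElem?_eq_some_iff.1 h with ⟨hlt, he⟩
  exact he ▸ List.getElem_mem hlt

theorem pv_strip_nil (sg : List (String × List Int)) (phi : List (String × Int)) :
    pvStrip phi [] sg = sg := by
  simp [pvStrip, pvValsIn]

-- ---- port A reaches a closed state ----
theorem aPass_inv (c : PvCtx) :
    ∀ (n i : Nat) (S : List String) (fixed : List String) (change : Bool),
    PvReach c S → (∀ a, a ∈ fixed ↔ a ∈ S) → c.sg.length ≤ i + n →
    ∃ T, PvReach c T ∧ (∀ a ∈ S, a ∈ T) ∧
      (∀ a, a ∈ (aPass n i (pvStrip c.phi S c.sg) fixed change).2.1 ↔ a ∈ T) ∧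
      (aPass n i (pvStrip c.phi S c.sg) fixed change).1 = pvStrip c.phi T c.sg ∧
      aTotal (pvStrip c.phi T c.sg) ≤ aTotal (pvStrip c.phi S c.sg) ∧
      ((aPass n i (pvStrip c.phi S c.sg) fixed change).2.2 = false →
        change = false ∧ pvStrip c.phi T c.sg = pvStrip c.phi S c.sg ∧
        ∀ j, i ≤ j → ∀ p, (pvStrip c.phi T c.sg)[j]? = some p → p.2.length = 1 →
          p.1 ∈ (aPass n i (pvStrip c.phi S c.sg) fixed change).2.1) ∧
      (((aPass n i (pvStrip c.phi S c.sg) fixed change).2.2 = true ∧ change = false) →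
        aTotal (pvStrip c.phi T c.sg) < aTotal (pvStrip c.phi S c.sg)) := by
  intro n
  induction n with
  | zero =>
    intro i S fixed change hr hfix hlen
    refine ⟨S, hr, fun a ha => ha, hfix, rfl, le_refl _, ?_, ?_⟩
    · intro hch
      refine ⟨hch, rfl, ?_⟩
      intro j hj p hp _
      have : (pvStrip c.phi S c.sg).length ≤ j := by
        rw [pv_strip_length]; omega
      rw [List.getElem?_eq_none this] at hp
      cases hp
    · rintro ⟨h1, h2⟩
      rw [aPass] at h1
      simp only [h2] at h1
      cases h1
  | succ n IH =>
    intro i S fixed change hr hfix hlen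
    rcases hsg : c.sg[i]? with _ | ⟨k0, vsg⟩
    · have hget : (pvStrip c.phi S c.sg)[i]? = none := by
        rw [pv_strip_getElem, hsg]; rfl
      rw [show aPass (n+1) i (pvStrip c.phi S c.sg) fixed change
          = (pvStrip c.phi S c.sg, fixed, change) from by rw [aPass, hget]]
      refine ⟨S, hr, fun a ha => ha, hfix, rfl, le_refl _, ?_, ?_⟩
      · intro hch
        refine ⟨hch, rfl, ?_⟩
        intro j hj p hp _
        have hnone : c.sg.length ≤ i := List.getElem?_eq_none_iff.1 hsg
        have : (pvStrip c.phi S c.sg).length ≤ j := by rw [pv_strip_length]; omega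
        rw [List.getElem?_eq_none this] at hp
        cases hp
      · rintro ⟨h1, h2⟩
        rw [h2] at h1
        cases h1
    · have hmemsg : (k0, vsg) ∈ c.sg := pv_mem_of_getElem? hsg
      have hget : (pvStrip c.phi S c.sg)[i]? =
          some (k0, vsg.filter (fun y => decide (y ∉ pvValsIn c.phi S k0))) := by
        rw [pv_strip_getElem, hsg]; rfl
      set w := vsg.filter (fun y => decide (y ∉ pvValsIn c.phi S k0)) with hw
      have hunf : aPass (n+1) i (pvStrip c.phi S c.sg) fixed change
          = if w.length = 1 ∧ k0 ∉ fixed then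
              aPass n (i+1) (aSweep k0 w.headI (pvStrip c.phi S c.sg)).1 (k0 :: fixed)
                (change || (aSweep k0 w.headI (pvStrip c.phi S c.sg)).2)
            else aPass n (i+1) (pvStrip c.phi S c.sg) fixed change := by
        rw [aPass, hget]
      by_cases hgd : w.length = 1 ∧ k0 ∉ fixed
      · -- fix k0
        obtain ⟨x, hkx, hfil⟩ := pv_singleton_char c (S := S) hmemsg hgd.1
        have hhead : w.headI = x := by rw [hw, hfil]; rfl
        have hkS : k0 ∉ S := fun hc => hgd.2 ((hfix k0).2 hc)
        have hreach' : PvReach c (k0 :: S) := PvReach.cons hr hkS hkx hmemsg hfil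
        have hsw1 : (aSweep k0 w.headI (pvStrip c.phi S c.sg)).1 = pvStrip c.phi (k0 :: S) c.sg := by
          rw [hhead, aSweep_fst, pv_sweep_step c hkx]
        have hfix' : ∀ a, a ∈ (k0 :: fixed) ↔ a ∈ (k0 :: S) := by
          intro a
          simp only [List.mem_cons]
          exact or_congr Iff.rfl (hfix a)
        obtain ⟨T, hT1, hT2, hT3, hT4, hT5, hT6, hT7⟩ :=
          IH (i+1) (k0 :: S) (k0 :: fixed)
            (change || (aSweep k0 w.headI (pvStrip c.phi S c.sg)).2) hreach' hfix'
            (by omega)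
        rw [hunf, if_pos hgd, hsw1]
        have hsz1 : aTotal (pvStrip c.phi (k0 :: S) c.sg) ≤ aTotal (pvStrip c.phi S c.sg) := by
          rw [← pv_sweep_step c hkx]
          exact pv_aTotal_sweep_le _ _ _
        refine ⟨T, hT1, fun a ha => hT2 a (List.mem_cons_of_mem _ ha), hT3, hT4,
          le_trans hT5 hsz1, ?_, ?_⟩
        · intro hch
          obtain ⟨hcc, hTeq, hclo⟩ := hT6 hch
          have hchf : change = false ∧ (aSweep k0 w.headI (pvStrip c.phi S c.sg)).2 = false := by
            rcases change <;> rcases hsw2 : (aSweep k0 w.headI (pvStrip c.phi S c.sg)).2 <;>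
              simp_all
          have hnoop : pvStrip c.phi (k0 :: S) c.sg = pvStrip c.phi S c.sg := by
            refine pv_sweep_noop c hkx ?_
            intro p hp hc
            have hT : (aSweep k0 w.headI (pvStrip c.phi S c.sg)).2 = true := by
              rw [hhead]
              exact (aSweep_snd _ _ _).2 ⟨p, hp, hc⟩
            rw [hT] at hchf
            exact absurd hchf.2 (by simp)
          refine ⟨hchf.1, hTeq.trans hnoop, ?_⟩
          intro j hj p hp hlp
          rcases Nat.eq_or_lt_of_le hj with heq | hj'
          · have hpj : (pvStrip c.phi T c.sg)[j]? = some (k0, w) := by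
              rw [← heq, hTeq, hnoop, hget]
            rw [hpj] at hp
            cases hp
            exact (hT3 k0).2 (hT2 k0 List.mem_cons_self)
          · exact hclo j hj' p hp hlp
        · rintro ⟨h1, h2⟩
          rcases hsw2 : (aSweep k0 w.headI (pvStrip c.phi S c.sg)).2
          · have hnoop : pvStrip c.phi (k0 :: S) c.sg = pvStrip c.phi S c.sg := by
              refine pv_sweep_noop c hkx ?_
              intro p hp hc
              have hT : (aSweep k0 w.headI (pvStrip c.phi S c.sg)).2 = true := by
                rw [hhead]
                exact (aSweep_snd _ _ _).2 ⟨p, hp, hc⟩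
              rw [hsw2] at hT
              cases hT
            rw [← hnoop]
            refine hT7 ⟨h1, ?_⟩
            rw [h2, hsw2]
            rfl
          · have hlt : aTotal (pvStrip c.phi (k0 :: S) c.sg) < aTotal (pvStrip c.phi S c.sg) := by
              rw [← pv_sweep_step c hkx]
              refine pv_aTotal_sweep_lt ?_
              rw [hhead] at hsw2
              exact (aSweep_snd _ _ _).1 hsw2
            exact lt_of_le_of_lt hT5 hlt
      · -- skip
        obtain ⟨T, hT1, hT2, hT3, hT4, hT5, hT6, hT7⟩ :=
          IH (i+1) S fixed change hr hfix (by omega)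
        rw [hunf, if_neg hgd]
        refine ⟨T, hT1, hT2, hT3, hT4, hT5, ?_, hT7⟩
        intro hch
        obtain ⟨hcc, hTeq, hclo⟩ := hT6 hch
        refine ⟨hcc, hTeq, ?_⟩
        intro j hj p hp hlp
        rcases Nat.eq_or_lt_of_le hj with heq | hj'
        · have hpj : (pvStrip c.phi T c.sg)[j]? = some (k0, w) := by
            rw [← heq, hTeq, hget]
          rw [hpj] at hp
          cases hp
          have hkf : k0 ∈ fixed := by
            by_contra hkf
            exact hgd ⟨hlp, hkf⟩
          exact (hT3 k0).2 (hT2 k0 ((hfix k0).1 hkf))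
        · exact hclo j hj' p hp hlp

theorem aLoop_inv (c : PvCtx) :
    ∀ (fuel : Nat) (S fixed : List String),
    PvReach c S → (∀ a, a ∈ fixed ↔ a ∈ S) →
    aTotal (pvStrip c.phi S c.sg) < fuel →
    ∃ T, PvReach c T ∧ PvClosed c T ∧
      aLoop fuel (pvStrip c.phi S c.sg) fixed = pvStrip c.phi T c.sg := by
  intro fuel
  induction fuel with
  | zero =>
    intro S fixed _ _ hsz
    exact absurd hsz (Nat.not_lt_zero _)
  | succ fuel IH =>
    intro S fixed hr hfix hsz
    obtain ⟨T1, h1, h2, h3, h4, h5, h6, h7⟩ :=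
      aPass_inv c (pvStrip c.phi S c.sg).length 0 S fixed false hr hfix
        (by rw [pv_strip_length]; omega)
    rw [aLoop]
    rcases hch : (aPass (pvStrip c.phi S c.sg).length 0 (pvStrip c.phi S c.sg) fixed false).2.2
    · -- stable pass: closed
      obtain ⟨_, hTeq, hclo⟩ := h6 hch
      rw [if_neg (by simp), h4]
      refine ⟨T1, h1, ?_, rfl⟩
      intro p hp hlen
      rcases List.mem_iff_getElem.1 hp with ⟨j, hjlt, hje⟩
      have hj : (pvStrip c.phi T1 c.sg)[j]? =
          some (p.1, p.2.filter (fun y => decide (y ∉ pvValsIn c.phi T1 p.1))) := by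
        rw [pv_strip_getElem, List.getElem?_eq_getElem hjlt, hje]
        rfl
      have := hclo j (Nat.zero_le _) _ hj hlen
      exact (h3 p.1).1 this
    · -- changing pass: recurse
      rw [if_pos rfl]
      have hlt := h7 ⟨hch, rfl⟩
      obtain ⟨T, hT1, hT2, hT3⟩ := IH T1 (aPass (pvStrip c.phi S c.sg).length 0
          (pvStrip c.phi S c.sg) fixed false).2.1
        h1 h3 (by omega)
      rw [h4]
      exact ⟨T, hT1, hT2, hT3⟩

-- ---- port B reaches a closed state ----
theorem pv_bLookup_eq {m : List (String × List Int)} (h : (m.map (·.1)).Nodup)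
    {k : String} {v : List Int} (hm : (k, v) ∈ m) : bLookup m k = v := by
  induction m with
  | nil => cases hm
  | cons p rest ih =>
    simp only [List.map_cons, List.nodup_cons] at h
    by_cases hp : p.1 = k
    · rcases List.mem_cons.1 hm with he | hm'
      · rw [← he] at hp ⊢
        simp [bLookup, List.find?_cons_of_pos]
      · exfalso
        rw [hp] at h
        exact h.1 (List.mem_map.2 ⟨_, hm', rfl⟩)
    · rcases List.mem_cons.1 hm with he | hm'
      · exact absurd (by rw [← he] : p.1 = (k, v).1) hp
      · rw [bLookup, List.find?_cons_of_neg (by simp [hp])]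
        exact ih h.2 hm' 

theorem pv_bLookup_mem {m : List (String × List Int)} {k : String}
    (h : k ∈ m.map (·.1)) : (k, bLookup m k) ∈ m := by
  induction m with
  | nil => simp at h
  | cons p rest ih =>
    by_cases hp : p.1 = k
    · rw [bLookup, List.find?_cons_of_pos (by simp [hp])]
      have : (k, p.2) = p := by rw [← hp]
      rw [show ((some p).map (fun kv => kv.2)).getD [] = p.2 from rfl, this]
      exact List.mem_cons_self
    · rw [bLookup, List.find?_cons_of_neg (by simp [hp])]
      rcases List.mem_map.1 h with ⟨q, hq, hq1⟩
      rcases List.mem_cons.1 hq with rfl | hq'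
      · exact absurd hq1 hp
      · exact List.mem_cons_of_mem _ (ih (List.mem_map.2 ⟨q, hq', hq1⟩))

theorem pv_bSweep_len (k : String) (x : Int) (m : List (String × List Int)) :
    (bSweep k x m).2.length + (m.filter (fun p => decide (p.1 = k))).length ≤ m.length := by
  induction m with
  | nil => simp [bSweep]
  | cons p rest ih =>
    by_cases hc : p.1 ≠ k ∧ x ∈ p.2
    · have hpk : ¬(p.1 = k) := hc.1
      obtain ⟨k2, v2⟩ := p
      rw [bSweep, if_pos hc]
      by_cases hl : (v2.erase x).length = 1
      · rw [if_pos hl]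
        simp only [List.length_cons, List.filter_cons, hpk]
        simp only [decide_eq_true_eq, hpk, if_false]
        omega
      · rw [if_neg hl]
        simp only [List.length_cons, List.filter_cons]
        simp only [decide_eq_true_eq, hpk, if_false]
        omega
    · obtain ⟨k2, v2⟩ := p
      rw [bSweep, if_neg hc]
      simp only [List.length_cons, List.filter_cons]
      by_cases hpk : k2 = k
      · simp only [decide_eq_true_eq, hpk, if_true]
        simp only [List.length_cons]
        omega
      · simp only [decide_eq_true_eq, hpk, if_false]
        omega

theorem pv_filter_congr_not_cons {l fixed : List String} {k : String} (hk : k ∉ l) :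
    l.filter (fun a => decide (a ∉ (k :: fixed))) = l.filter (fun a => decide (a ∉ fixed)) := by
  refine List.filter_congr ?_
  intro a ha
  have hak : a ≠ k := fun he => hk (he ▸ ha)
  rw [decide_eq_decide]
  simp [List.mem_cons, hak]

theorem pv_unfixed_dec {l : List String} (hnd : l.Nodup) {k : String} {fixed : List String}
    (hk : k ∈ l) (hkf : k ∉ fixed) :
    (l.filter (fun a => decide (a ∉ (k :: fixed)))).length + 1 =
      (l.filter (fun a => decide (a ∉ fixed))).length := by
  induction l with
  | nil => cases hk
  | cons a rest ih =>
    rw [List.nodup_cons] at hnd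
    rw [List.filter_cons, List.filter_cons]
    rcases List.mem_cons.1 hk with heq | hk'
    · obtain rfl : a = k := heq.symm
      have h1 : (decide (a ∉ (a :: fixed))) = false := by simp
      have h2 : (decide (a ∉ fixed)) = true := by simpa using hkf
      rw [h1, h2]
      simp only [Bool.false_eq_true, if_false, if_true, List.length_cons]
      have h3 := congrArg List.length (pv_filter_congr_not_cons (fixed := fixed) hnd.1 (k := a))
      omega
    · have hak : a ≠ k := fun he => hnd.1 (he ▸ hk')
      have hiff : (decide (a ∉ (k :: fixed))) = (decide (a ∉ fixed)) := by
        rw [decide_eq_decide]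
        simp [List.mem_cons, hak]
      rw [hiff]
      have h3 := ih hnd.2 hk'
      rcases hd : (decide (a ∉ fixed))
      · simp only [hd, Bool.false_eq_true, if_false]
        exact h3
      · simp only [hd, if_true, List.length_cons]
        omega

theorem bGo_inv (c : PvCtx) :
    ∀ (fuel : Nat) (S q fixed : List String),
    PvReach c S → (∀ a, a ∈ fixed ↔ a ∈ S) →
    (∀ a ∈ q, a ∈ c.sg.map (·.1)) →
    (∀ p ∈ pvStrip c.phi S c.sg, p.2.length = 1 → p.1 ∈ fixed ∨ p.1 ∈ q) →
    q.length + ((c.sg.map (·.1)).filter (fun a => decide (a ∉ fixed))).length * c.sg.length < fuel →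
    ∃ T, PvReach c T ∧ PvClosed c T ∧
      bGo fuel (pvStrip c.phi S c.sg) q fixed = pvStrip c.phi T c.sg := by
  intro fuel
  induction fuel with
  | zero =>
    intro S q fixed _ _ _ _ hsz
    exact absurd hsz (Nat.not_lt_zero _)
  | succ fuel IH =>
    intro S q fixed hr hfix hqk hqinv hsz
    rcases hlast : q.getLast? with _ | k
    · -- empty queue: closed
      have hq : q = [] := List.getLast?_eq_none_iff.1 hlast
      rw [bGo, hlast]
      refine ⟨S, hr, ?_, rfl⟩
      intro p hp hlen
      rcases hqinv (p.1, p.2.filter (fun y => decide (y ∉ pvValsIn c.phi S p.1)))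
          (List.mem_map.2 ⟨p, hp, rfl⟩) hlen with hf | hqq
      · exact (hfix _).1 hf
      · rw [hq] at hqq; cases hqq
    · obtain ⟨l', rfl⟩ := List.getLast?_eq_some_iff.1 hlast
      have hdl : (l' ++ [k]).dropLast = l' := List.dropLast_concat ..
      have hkq : k ∈ l' ++ [k] := List.mem_append.2 (Or.inr List.mem_cons_self)
      have hkkeys : k ∈ c.sg.map (·.1) := hqk k hkq
      have hkkeys' : k ∈ (pvStrip c.phi S c.sg).map (·.1) := by
        rw [pv_strip_keys]; exact hkkeys
      have hl'sub : ∀ a ∈ l', a ∈ c.sg.map (·.1) :=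
        fun a ha => hqk a (List.mem_append.2 (Or.inl ha))
      simp only [bGo, hlast, hdl]
      by_cases hgd : k ∈ fixed ∨ ¬(bLookup (pvStrip c.phi S c.sg) k).length = 1
      · -- skip
        rw [if_pos hgd]
        refine IH S l' fixed hr hfix hl'sub ?_ (by
          have : (l' ++ [k]).length = l'.length + 1 := by simp
          omega)
        intro p hp hlen
        rcases hqinv p hp hlen with hf | hqq
        · exact Or.inl hf
        · rcases List.mem_append.1 hqq with h | h
          · exact Or.inr h
          · -- p.1 = k : k is fixed, or its list is not a singleton
            have hpk : p.1 = k := by simpa using h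
            rcases hgd with hgd | hgd
            · exact Or.inl (hpk ▸ hgd)
            · exfalso
              have hkeysnodup : ((pvStrip c.phi S c.sg).map (·.1)).Nodup := by
                rw [pv_strip_keys]; exact c.hkeys
              have hp' : (p.1, p.2) ∈ pvStrip c.phi S c.sg := hp
              rw [hpk] at hp'
              have := pv_bLookup_eq hkeysnodup hp'
              rw [this] at hgd
              exact hgd hlen
      · -- fix k
        rw [if_neg hgd]
        push_neg at hgd
        obtain ⟨hkfix, hklen⟩ := hgd
        have hkeysnodup : ((pvStrip c.phi S c.sg).map (·.1)).Nodup := by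
          rw [pv_strip_keys]; exact c.hkeys
        have hkmem : (k, bLookup (pvStrip c.phi S c.sg) k) ∈ pvStrip c.phi S c.sg :=
          pv_bLookup_mem hkkeys'
        rcases List.mem_map.1 hkmem with ⟨⟨k1, vsg⟩, hsgmem, hpe⟩
        have hk1 : k1 = k := congrArg Prod.fst hpe
        subst hk1
        have hwe : vsg.filter (fun y => decide (y ∉ pvValsIn c.phi S k1)) =
            bLookup (pvStrip c.phi S c.sg) k1 := congrArg Prod.snd hpe
        obtain ⟨x, hkx, hfil⟩ := pv_singleton_char c (S := S) hsgmem (by rw [hwe]; exact hklen)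
        have hhead : (bLookup (pvStrip c.phi S c.sg) k1).headI = x := by
          rw [← hwe, hfil]; rfl
        have hkS : k1 ∉ S := fun hc => hkfix ((hfix k1).2 hc)
        have hreach' : PvReach c (k1 :: S) := PvReach.cons hr hkS hkx hsgmem hfil
        have hsw1 : (bSweep k1 (bLookup (pvStrip c.phi S c.sg) k1).headI
            (pvStrip c.phi S c.sg)).1 = pvStrip c.phi (k1 :: S) c.sg := by
          rw [hhead, bSweep_fst, pv_sweep_step c hkx]
        have hfix' : ∀ a, a ∈ (k1 :: fixed) ↔ a ∈ (k1 :: S) := by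
          intro a
          simp only [List.mem_cons]
          exact or_congr Iff.rfl (hfix a)
        set s2 := (bSweep k1 (bLookup (pvStrip c.phi S c.sg) k1).headI
            (pvStrip c.phi S c.sg)).2 with hs2
        have hs2sub : ∀ a ∈ s2, a ∈ c.sg.map (·.1) := by
          intro a ha
          rw [hs2] at ha
          rcases (bSweep_snd _ _ _).1 ha with ⟨v2, hv2, _⟩
          have : a ∈ (pvStrip c.phi S c.sg).map (·.1) := List.mem_map.2 ⟨_, hv2, rfl⟩
          rw [pv_strip_keys] at this
          exact this
        have hqk' : ∀ a ∈ l' ++ s2, a ∈ c.sg.map (·.1) := by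
          intro a ha
          rcases List.mem_append.1 ha with h | h
          · exact hl'sub a h
          · exact hs2sub a h
        have hqinv' : ∀ p ∈ pvStrip c.phi (k1 :: S) c.sg, p.2.length = 1 →
            p.1 ∈ (k1 :: fixed) ∨ p.1 ∈ (l' ++ s2) := by
          intro p hp hlen
          rw [← pv_sweep_step c hkx] at hp
          rcases List.mem_map.1 hp with ⟨p0, hp0, hgp⟩
          by_cases hc : p0.1 ≠ k1 ∧ x ∈ p0.2
          · rw [if_pos hc] at hgp
            have hp1 : p.1 = p0.1 := by rw [← hgp]
            have hp2 : p.2 = p0.2.erase x := by rw [← hgp]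
            right
            refine List.mem_append.2 (Or.inr ?_)
            rw [hs2, hp1]
            refine (bSweep_snd _ _ _).2 ⟨p0.2, hp0, hc.1, ?_, ?_⟩
            · rw [hhead]; exact hc.2
            · rw [hhead, ← hp2]; exact hlen
          · rw [if_neg hc] at hgp
            obtain rfl := hgp
            rcases hqinv p0 hp0 hlen with hf | hqq
            · exact Or.inl (List.mem_cons_of_mem _ hf)
            · rcases List.mem_append.1 hqq with h | h
              · exact Or.inr (List.mem_append.2 (Or.inl h))
              · left
                have : p0.1 = k1 := by simpa using h
                rw [this]
                exact List.mem_cons_self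
        -- fuel arithmetic
        have hn1 : 1 ≤ c.sg.length := by
          rcases List.mem_map.1 hkkeys with ⟨p, hp, _⟩
          exact List.length_pos_of_mem hp
        have hs2len : s2.length + 1 ≤ c.sg.length := by
          rw [hs2]
          have h1 := pv_bSweep_len k1 (bLookup (pvStrip c.phi S c.sg) k1).headI
            (pvStrip c.phi S c.sg)
          have h2 : 1 ≤ ((pvStrip c.phi S c.sg).filter (fun p => decide (p.1 = k1))).length :=
            List.length_pos_of_mem (List.mem_filter.2 ⟨hkmem, by simp⟩)
          rw [pv_strip_length] at h1
          omega
        have hudec : ((c.sg.map (·.1)).filter (fun a => decide (a ∉ (k1 :: fixed)))).length + 1 =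
            ((c.sg.map (·.1)).filter (fun a => decide (a ∉ fixed))).length :=
          pv_unfixed_dec c.hkeys hkkeys hkfix
        have hu1 : 1 ≤ ((c.sg.map (·.1)).filter (fun a => decide (a ∉ fixed))).length :=
          List.length_pos_of_mem (List.mem_filter.2 ⟨hkkeys, by simpa using hkfix⟩)
        have hql : (l' ++ [k1]).length = l'.length + 1 := by simp
        have hql2 : (l' ++ s2).length = l'.length + s2.length := by simp
        obtain ⟨T, hT1, hT2, hT3⟩ := IH (k1 :: S) (l' ++ s2) (k1 :: fixed)
          hreach' hfix' hqk' hqinv' (by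
            set n := c.sg.length
            set u := ((c.sg.map (·.1)).filter (fun a => decide (a ∉ fixed))).length
            set u' := ((c.sg.map (·.1)).filter (fun a => decide (a ∉ (k1 :: fixed)))).length
            have hmul : u' * n + n = u * n := by
              have : u' + 1 = u := hudec
              calc u' * n + n = (u' + 1) * n := by ring
                _ = u * n := by rw [this]
            omega)
        rw [hsw1]
        exact ⟨T, hT1, hT2, hT3⟩

-- ---- context construction from Pre_ ----
theorem pv_choice_spec (S0 : List (String × List Int)) (phi : List (String × Int)) :
    phi ∈ pvChoiceSets S0 →
    phi.map (·.1) = S0.map (·.1) ∧ ∀ q ∈ phi, ∃ p ∈ S0, q.1 = p.1 ∧ q.2 ∈ p.2 := by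
  induction S0 generalizing phi with
  | nil =>
    intro h
    simp only [pvChoiceSets, List.foldr_nil, List.mem_singleton] at h
    subst h
    simp
  | cons p t ih =>
    intro h
    simp only [pvChoiceSets, List.foldr_cons, List.mem_flatMap, List.mem_map] at h
    obtain ⟨x, hx, psi, hpsi, rfl⟩ := h
    have hspec := ih psi (by simpa [pvChoiceSets] using hpsi)
    constructor
    · simp [hspec.1]
    · intro q hq
      rcases List.mem_cons.1 hq with rfl | hq'
      · exact ⟨p, List.mem_cons_self, rfl, hx⟩
      · obtain ⟨p', hp', h1, h2⟩ := hspec.2 q hq'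
        exact ⟨p', List.mem_cons_of_mem _ hp', h1, h2⟩

theorem pv_good_unpack {map : List (String × List Int)} {phi : List (String × Int)}
    (h : pvGoodFor map phi = true) :
    (phi.map (·.2)).Nodup ∧
    (∀ p ∈ map, ∀ q ∈ phi, q.1 = p.1 →
        q.2 ∈ p.2 ∧ ∀ y ∈ p.2, y ∉ pvValsExcept phi p.1 → y = q.2) ∧
    (∀ p ∈ map, (∀ q ∈ phi, q.1 ≠ p.1) →
        ∃ y ∈ p.2, ∃ z ∈ p.2, y ≠ z ∧ y ∉ pvVals phi ∧ z ∉ pvVals phi) := by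
  rw [pvGoodFor, Bool.and_eq_true, Bool.and_eq_true] at h
  obtain ⟨⟨h1, h2⟩, h3⟩ := h
  refine ⟨by simpa using h1, ?_, ?_⟩
  · intro p hp q hq hqp
    have hpq := List.all_eq_true.1 (List.all_eq_true.1 h2 p hp) q hq
    rw [Bool.or_eq_true] at hpq
    rcases hpq with hne | hcon
    · rw [bne_iff_ne] at hne
      exact absurd hqp hne
    · rw [Bool.and_eq_true] at hcon
      refine ⟨by simpa using hcon.1, ?_⟩
      intro y hy hnotin
      have hyy := List.all_eq_true.1 hcon.2 y hy
      rw [Bool.or_eq_true] at hyy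
      rcases hyy with hin | heq
      · exact absurd (by simpa using hin) hnotin
      · simpa using heq
  · intro p hp hnone
    have hpp := List.all_eq_true.1 h3 p hp
    rw [Bool.or_eq_true] at hpp
    rcases hpp with hall | hany
    · exfalso
      rw [Bool.not_eq_eq_eq_not, Bool.not_true, List.all_eq_false] at hall
      obtain ⟨q, hq, hqe⟩ := hall
      rw [Bool.not_eq_true, bne_eq_false_iff_eq] at hqe
      exact hnone q hq hqe
    · rw [List.any_eq_true] at hany
      obtain ⟨y, hy, hya⟩ := hany
      rw [List.any_eq_true] at hya
      obtain ⟨z, hz, hcond⟩ := hya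
      rw [Bool.and_eq_true, Bool.and_eq_true] at hcond
      obtain ⟨⟨hyz, hyn⟩, hzn⟩ := hcond
      rw [bne_iff_ne] at hyz
      refine ⟨y, hy, z, hz, hyz, ?_, ?_⟩
      · intro hc
        rw [Bool.not_eq_eq_eq_not, Bool.not_true] at hyn
        exact absurd (by simpa using hyn : y ∉ pvVals phi) (fun hcc => hcc hc)
      · intro hc
        rw [Bool.not_eq_eq_eq_not, Bool.not_true] at hzn
        exact absurd (by simpa using hzn : z ∉ pvVals phi) (fun hcc => hcc hc)

theorem pv_ctx_of_pre (map : List (String × List Int)) (h : Pre_find_bijection map) :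
    ∃ c : PvCtx, c.sg = map.map (fun kv => (kv.1, pvSetNorm kv.2)) := by
  obtain ⟨⟨hnk, hnv⟩, S0, hS0, phi, hphi, hgood⟩ := h
  obtain ⟨g1, g2, g3⟩ := pv_good_unpack hgood
  obtain ⟨hkeys0, hpairs⟩ := pv_choice_spec S0 phi hphi
  have hS0sub : S0.Sublist map := List.mem_sublists.1 hS0
  have hS0mem : ∀ p ∈ S0, p ∈ map := fun p hp => hS0sub.mem hp
  have hsgkeys : ((map.map (fun kv => (kv.1, pvSetNorm kv.2))).map (·.1)).Nodup := by
    rw [List.map_map]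
    exact hnk
  have hmemiff : ∀ (p : String × List Int), p ∈ map.map (fun kv => (kv.1, pvSetNorm kv.2)) →
      ∃ p0 ∈ map, p.1 = p0.1 ∧ p.2 = pvSetNorm p0.2 := by
    intro p hp
    rcases List.mem_map.1 hp with ⟨p0, hp0, he⟩
    exact ⟨p0, hp0, by rw [← he], by rw [← he]⟩
  refine ⟨⟨map.map (fun kv => (kv.1, pvSetNorm kv.2)), phi, hsgkeys, ?_, ?_, g1, ?_, ?_, ?_⟩, rfl⟩
  · intro p hp
    rcases hmemiff p hp with ⟨p0, _, _, he⟩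
    rw [he]
    exact pvSetNorm_nodup _
  · -- phi keys nodup
    rw [hkeys0]
    exact hnk.sublist (hS0sub.map _)
  · -- hmem
    intro q hq p hp hpe
    rcases hmemiff p hp with ⟨p0, hp0, he1, he2⟩
    rw [he2, pvSetNorm_mem]
    exact (g2 p0 hp0 q hq (by rw [← he1, hpe])).1
  · -- hforced
    intro p hp q hq hqe y hy hnotin
    rcases hmemiff p hp with ⟨p0, hp0, he1, he2⟩
    rw [he2, pvSetNorm_mem] at hy
    have := (g2 p0 hp0 q hq (by rw [hqe, he1])).2 y hy
    rw [he1] at hnotin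
    exact this hnotin
  · -- hfree
    intro p hp hnone
    rcases hmemiff p hp with ⟨p0, hp0, he1, he2⟩
    rw [he1] at hnone
    obtain ⟨y, hy, z, hz, hyz, hyn, hzn⟩ := g3 p0 hp0 hnone
    rw [he2]
    exact ⟨y, pvSetNorm_mem.2 hy, z, pvSetNorm_mem.2 hz, hyz, hyn, hzn⟩

-- ===== VERDICT (by name: the statement is the Claim_ definition above) =====
theorem find_bijection_spec : Claim_equal_find_bijection := by
  intro map _ hpre
  obtain ⟨c, hc⟩ := pv_ctx_of_pre map hpre
  unfold Spec_find_bijection find_bijection find_bijection_alt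
  rw [← hc]
  -- port A reaches a reachable closed state
  obtain ⟨TA, hA1, hA2, hA3⟩ := by
    have h := aLoop_inv c (aTotal c.sg + 1) [] [] PvReach.nil (by simp)
      (by rw [pv_strip_nil]; omega)
    rw [pv_strip_nil] at h
    exact h
  -- port B reaches a reachable closed state
  obtain ⟨TB, hB1, hB2, hB3⟩ := by
    have h := bGo_inv c (c.sg.length * c.sg.length + c.sg.length + 1) []
      ((c.sg.filter (fun kv => kv.2.length = 1)).map (fun kv => kv.1)) []
      PvReach.nil (by simp)
      (by
        intro a ha
        rcases List.mem_map.1 ha with ⟨kv, hkv, he⟩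
        exact he ▸ List.mem_map.2 ⟨kv, List.mem_of_mem_filter hkv, rfl⟩)
      (by
        rw [pv_strip_nil]
        intro p hp hlen
        exact Or.inr (List.mem_map.2 ⟨p, List.mem_filter.2 ⟨hp, by simpa using hlen⟩, rfl⟩))
      (by
        have h1 : ((c.sg.filter (fun kv => kv.2.length = 1)).map (fun kv => kv.1)).length
            ≤ c.sg.length := by
          rw [List.length_map]
          exact List.length_filter_le _ _
        have h2 : ((c.sg.map (·.1)).filter (fun a => decide (a ∉ ([] : List String)))).length
            ≤ c.sg.length := le_trans (List.length_filter_le _ _) (by rw [List.length_map])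
        have h3 : ((c.sg.map (·.1)).filter (fun a => decide (a ∉ ([] : List String)))).length
              * c.sg.length ≤ c.sg.length * c.sg.length :=
          Nat.mul_le_mul_right _ h2
        omega)
    rw [pv_strip_nil] at h
    exact h
  show (aLoop (aTotal c.sg + 1) c.sg []).map (fun kv => (kv.1, kv.2.headI)) =
      (bGo (c.sg.length * c.sg.length + c.sg.length + 1) c.sg
        ((c.sg.filter (fun kv => decide (kv.2.length = 1))).map (fun kv => kv.1)) []).map
        (fun kv => (kv.1, kv.2.headI))
  rw [hA3, hB3, pv_strip_eq_of_closed c hA1 hB1 hA2 hB2]
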